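-- pv_equiv track=rewrite | github.com/shinelotto/shinelotto.github.io | blueprints/dlt_bp.py | calculate_zone_ratio
-- ===== SOURCE A (Python) =====
-- def calculate_zone_ratio(numbers):
--     """计算前区区间比（1-12, 13-24, 25-35）"""
--     if not numbers:
--         return "0:0:0"
--     zone_counts = [
--         sum(1 for n in numbers if 1 <= n <= 12),
--         sum(1 for n in numbers if 13 <= n <= 24),
--         sum(1 for n in numbers if 25 <= n <= 35)
--     ]
--     return f"{zone_counts[0]}:{zone_counts[1]}:{zone_counts[2]}"
-- ===== SOURCE B (Python) =====
-- def calculate_zone_ratio(numbers):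
--     c0 = c1 = c2 = 0
--     for n in numbers:
--         if 1 <= n <= 12:
--             c0 += 1
--         elif 13 <= n <= 24:
--             c1 += 1
--         elif 25 <= n <= 35:
--             c2 += 1
--     return f"{c0}:{c1}:{c2}"
-- ===== Notes on version B (the rewrite author's own statement) =====
-- stated objective: simpler
-- what changed: Replaces three separate generator-sum passes (plus an empty-list guard) with one loop over the list maintaining three counters bumped by an if/elif chain; the guard disappears since one pass yields 0:0:0 on empty input.
import Mathlib
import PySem

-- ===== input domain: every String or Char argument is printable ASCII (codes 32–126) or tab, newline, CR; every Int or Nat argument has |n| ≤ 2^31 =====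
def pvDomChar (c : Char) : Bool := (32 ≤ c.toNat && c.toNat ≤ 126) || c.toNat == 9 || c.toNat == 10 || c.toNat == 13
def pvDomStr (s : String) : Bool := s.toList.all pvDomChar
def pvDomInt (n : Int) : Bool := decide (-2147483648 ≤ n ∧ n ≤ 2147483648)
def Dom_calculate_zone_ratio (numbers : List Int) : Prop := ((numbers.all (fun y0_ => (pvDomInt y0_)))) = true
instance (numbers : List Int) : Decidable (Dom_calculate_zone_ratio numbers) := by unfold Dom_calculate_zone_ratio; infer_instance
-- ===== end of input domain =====

-- B replaces A's empty-list guard and three generator-sum passes with one fold keeping three counters; objective: simpler.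

-- ===== PORT A =====
-- sum(1 for n in numbers if cond) transliterated as a left fold adding 1 when cond holds
def pvSumIf (numbers : List Int) (cond : Int → Bool) : Int :=
  numbers.foldl (fun acc n => if cond n then acc + 1 else acc) 0

def calculate_zone_ratio (numbers : List Int) : String :=
  if numbers = [] then "0:0:0"
  else
    let zone_counts : List Int :=
      [ pvSumIf numbers (fun n => 1 ≤ n && n ≤ 12),
        pvSumIf numbers (fun n => 13 ≤ n && n ≤ 24),
        pvSumIf numbers (fun n => 25 ≤ n && n ≤ 35) ]
    PySem.Int.toStr (zone_counts.getD 0 0) ++ ":" ++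
    PySem.Int.toStr (zone_counts.getD 1 0) ++ ":" ++
    PySem.Int.toStr (zone_counts.getD 2 0)

-- ===== PORT B =====
-- one pass, three counters, if/elif chain
def pvZoneStep (c : Int × Int × Int) (n : Int) : Int × Int × Int :=
  if 1 ≤ n && n ≤ 12 then (c.1 + 1, c.2.1, c.2.2)
  else if 13 ≤ n && n ≤ 24 then (c.1, c.2.1 + 1, c.2.2)
  else if 25 ≤ n && n ≤ 35 then (c.1, c.2.1, c.2.2 + 1)
  else c

def calculate_zone_ratio_alt (numbers : List Int) : String :=
  let c := numbers.foldl pvZoneStep (0, 0, 0)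
  PySem.Int.toStr c.1 ++ ":" ++ PySem.Int.toStr c.2.1 ++ ":" ++ PySem.Int.toStr c.2.2

-- ===== PRECONDITION & SPEC =====
def Spec_calculate_zone_ratio (numbers : List Int) (out : String) : Prop := out = calculate_zone_ratio_alt numbers
instance (numbers : List Int) (out : String) : Decidable (Spec_calculate_zone_ratio numbers out) := by unfold Spec_calculate_zone_ratio; infer_instance

-- ===== CLAIM (what is proved, stated in full; the proofs are below) =====
def Claim_equal_calculate_zone_ratio : Prop := ∀ (numbers : List Int), Dom_calculate_zone_ratio numbers → Spec_calculate_zone_ratio numbers (calculate_zone_ratio numbers)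

-- ===== LEMMAS AND PROOFS =====

theorem pvSumIf_shift (cond : Int → Bool) (ys : List Int) (a : Int) :
    ys.foldl (fun acc n => if cond n then acc + 1 else acc) a = a + pvSumIf ys cond := by
  induction ys generalizing a with
  | nil => simp [pvSumIf]
  | cons y ys ih =>
    simp only [pvSumIf, List.foldl_cons]
    rw [ih, ih]
    split <;> ring

theorem pvSumIf_cons (cond : Int → Bool) (x : Int) (xs : List Int) :
    pvSumIf (x :: xs) cond = (if cond x then 1 else 0) + pvSumIf xs cond := by
  simp only [pvSumIf, List.foldl_cons]
  rw [pvSumIf_shift]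
  simp only [pvSumIf]
  split <;> ring

theorem pvZone_fold (numbers : List Int) (c0 c1 c2 : Int) :
    numbers.foldl pvZoneStep (c0, c1, c2) =
      (c0 + pvSumIf numbers (fun n => 1 ≤ n && n ≤ 12),
       c1 + pvSumIf numbers (fun n => 13 ≤ n && n ≤ 24),
       c2 + pvSumIf numbers (fun n => 25 ≤ n && n ≤ 35)) := by
  induction numbers generalizing c0 c1 c2 with
  | nil => simp [pvSumIf]
  | cons x xs ih =>
    rw [List.foldl_cons, pvSumIf_cons, pvSumIf_cons, pvSumIf_cons]
    by_cases h1 : (1 ≤ x && x ≤ 12) = true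
    · have hx : 1 ≤ x ∧ x ≤ 12 := by simpa using h1
      have h2 : ((13:Int) ≤ x && x ≤ 24) = false := by simp; omega
      have h3 : ((25:Int) ≤ x && x ≤ 35) = false := by simp; omega
      rw [show pvZoneStep (c0, c1, c2) x = (c0 + 1, c1, c2) from by simp [pvZoneStep, h1], ih]
      simp [h1, h2, h3, add_assoc]
    · by_cases h2 : (13 ≤ x && x ≤ 24) = true
      · have hx : 13 ≤ x ∧ x ≤ 24 := by simpa using h2
        have h3 : ((25:Int) ≤ x && x ≤ 35) = false := by simp; omega
        rw [show pvZoneStep (c0, c1, c2) x = (c0, c1 + 1, c2) from by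
              simp [pvZoneStep, h1, h2], ih]
        simp [h1, h2, h3, add_assoc]
      · by_cases h3 : (25 ≤ x && x ≤ 35) = true
        · rw [show pvZoneStep (c0, c1, c2) x = (c0, c1, c2 + 1) from by
                simp [pvZoneStep, h1, h2, h3], ih]
          simp [h1, h2, h3, add_assoc]
        · rw [show pvZoneStep (c0, c1, c2) x = (c0, c1, c2) from by
                simp [pvZoneStep, h1, h2, h3], ih]
          simp [h1, h2, h3]

-- ===== VERDICT (by name: the statement is the Claim_ definition above) =====
theorem calculate_zone_ratio_spec : Claim_equal_calculate_zone_ratio := by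
  intro numbers _
  unfold Spec_calculate_zone_ratio calculate_zone_ratio calculate_zone_ratio_alt
  rw [pvZone_fold]
  by_cases h : numbers = []
  · subst h; decide
  · simp [h]
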